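-- pv_equiv track=rewrite | github.com/samjwu/ProgrammingProblemsPython | 2554/Solution.py | maxCount
-- ===== SOURCE A (Python) =====
-- from typing import List
--
-- def maxCount(banned: List[int], n: int, maxSum: int) -> int:
--     bans = set(banned)
--
--     runningSum = 0
--     ans = 0
--
--     for i in range(1, n+1):
--         if i in bans:
--             continue
--
--         if runningSum + i <= maxSum:
--             runningSum += i
--             ans += 1
--         else:
--             return ans
--
--     return ans
-- ===== SOURCE B (Python) =====
-- # Gap-walk re-implementation: process contiguous unbanned blocks with the
-- # triangular-sum formula; only the final overflowing block is scanned.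
-- def maxCount(banned, n, maxSum):
--     bs = sorted({b for b in banned if 1 <= b <= n})
--     ans = 0
--     remaining = maxSum
--     lo = 1
--     for b in bs + [n + 1]:
--         hi = b - 1
--         if lo <= hi:
--             full = (lo + hi) * (hi - lo + 1) // 2
--             if full <= remaining:
--                 ans += hi - lo + 1
--                 remaining -= full
--             else:
--                 i = lo
--                 while remaining - i >= 0:
--                     remaining -= i
--                     ans += 1
--                     i += 1
--                 return ans
--         lo = b + 1
--     return ans
-- ===== Notes on version B (the rewrite author's own statement) =====
-- stated objective: faster
-- what changed: Instead of scanning every integer 1..n and testing set membership, B sorts the deduplicated banned values inside [1,n] and walks the contiguous unbanned gaps, adding each whole gap that fits in O(1) via the triangular-sum formula and linearly scanning only inside the single final overflowing gap.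
import Mathlib
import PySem

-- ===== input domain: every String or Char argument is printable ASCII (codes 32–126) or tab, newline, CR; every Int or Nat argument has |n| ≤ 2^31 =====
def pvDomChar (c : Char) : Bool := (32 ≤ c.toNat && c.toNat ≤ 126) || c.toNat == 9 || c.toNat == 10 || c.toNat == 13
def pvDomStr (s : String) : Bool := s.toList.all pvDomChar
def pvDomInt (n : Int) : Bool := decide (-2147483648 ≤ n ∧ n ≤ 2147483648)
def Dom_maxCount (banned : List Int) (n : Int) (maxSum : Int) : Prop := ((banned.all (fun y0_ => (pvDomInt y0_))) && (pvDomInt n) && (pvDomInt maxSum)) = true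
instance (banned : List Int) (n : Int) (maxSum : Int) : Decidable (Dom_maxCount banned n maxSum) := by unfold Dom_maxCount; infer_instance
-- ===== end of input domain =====

-- B replaces A's element-by-element scan of 1..n by a walk over the gaps between
-- the sorted banned values, taking each whole gap in O(1) with the triangular-sum
-- formula and scanning only inside the final overflowing gap (objective: faster).

-- ===== PORT A =====
-- the `for i in range(1, n+1)` loop with early return; state = (runningSum, ans);
-- Python's range is iterated lazily, so the loop recurses on the counter i with a
-- structural fuel = number of remaining range elements
def maxCount_loop (bans : PySem.Set Int) (maxSum : Int) : Nat → Int → Int → Int → Int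
  | 0, _, _, ans => ans
  | fuel + 1, i, runningSum, ans =>
    if PySem.Set.contains bans i then maxCount_loop bans maxSum fuel (i + 1) runningSum ans
    else if runningSum + i ≤ maxSum then
      maxCount_loop bans maxSum fuel (i + 1) (runningSum + i) (ans + 1)
    else ans

def maxCount (banned : List Int) (n : Int) (maxSum : Int) : Int :=
  maxCount_loop (PySem.Set.ofList banned) maxSum n.toNat 1 0 0

-- ===== PORT B =====
-- the inner `while remaining - i >= 0` loop of Source B; the Nat fuel only makes the
-- recursion total (and structural): every call below passes enough fuel, since the
-- loop runs at most remaining - i + 1 times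
def maxCount_scanB : Nat → Int → Int → Int → Int
  | 0, _, _, ans => ans
  | fuel + 1, remaining, i, ans =>
    if 0 ≤ remaining - i then maxCount_scanB fuel (remaining - i) (i + 1) (ans + 1) else ans

-- the `for b in bs + [n + 1]` loop; state = (remaining, ans, lo)
def maxCount_gaps : List Int → Int → Int → Int → Int
  | [], _, ans, _ => ans
  | b :: rest, remaining, ans, lo =>
    let hi := b - 1
    if lo ≤ hi then
      let full := PySem.Int.floordiv ((lo + hi) * (hi - lo + 1)) 2
      if full ≤ remaining then maxCount_gaps rest (remaining - full) (ans + (hi - lo + 1)) (b + 1)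
      else maxCount_scanB ((remaining - lo + 1).toNat + 1) remaining lo ans
    else maxCount_gaps rest remaining ans (b + 1)

def maxCount_alt (banned : List Int) (n : Int) (maxSum : Int) : Int :=
  let bs := PySem.List.sorted
    (PySem.Set.ofList (banned.filter (fun b => decide (1 ≤ b ∧ b ≤ n)))) (fun x => x) false
  maxCount_gaps (bs ++ [n + 1]) maxSum 0 1

-- ===== PRECONDITION & SPEC =====
def Spec_maxCount (banned : List Int) (n : Int) (maxSum : Int) (out : Int) : Prop := out = maxCount_alt banned n maxSum
instance (banned : List Int) (n : Int) (maxSum : Int) (out : Int) : Decidable (Spec_maxCount banned n maxSum out) := by unfold Spec_maxCount; infer_instance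

-- ===== CLAIM (what is proved, stated in full; the proofs are below) =====
def Claim_equal_maxCount : Prop := ∀ (banned : List Int) (n : Int) (maxSum : Int), Dom_maxCount banned n maxSum → Spec_maxCount banned n maxSum (maxCount banned n maxSum)

-- ===== LEMMAS AND PROOFS =====

-- A's loop with the banned elements already filtered away
def scanA (mx : Int) : List Int → Int → Int → Int
  | [], _, ans => ans
  | i :: rest, s, ans =>
    if s + i ≤ mx then scanA mx rest (s + i) (ans + 1) else ans

-- triangular sum of lo..hi exactly as B computes it
def Tsum (lo hi : Int) : Int := PySem.Int.floordiv ((lo + hi) * (hi - lo + 1)) 2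

lemma maxCount_loop_eq_scanA (bans : PySem.Set Int) (n mx : Int) :
    ∀ (fuel : Nat) (i s ans : Int), (fuel : Int) = max (n + 1 - i) 0 →
      maxCount_loop bans mx fuel i s ans
        = scanA mx ((PySem.List.pyRange i (n + 1) 1).filter
            (fun j => !(PySem.Set.contains bans j))) s ans := by
  intro fuel
  induction fuel with
  | zero =>
    intro i s ans hk
    rw [PySem.List.pyRange_one_eq_nil (by push_cast at hk; omega)]
    rfl
  | succ fuel ih =>
    intro i s ans hk
    have hi : i < n + 1 := by push_cast at hk; omega
    rw [PySem.List.pyRange_one_cons (by omega), List.filter_cons]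
    by_cases hb : PySem.Set.contains bans i
    · rw [show maxCount_loop bans mx (fuel + 1) i s ans
          = maxCount_loop bans mx fuel (i + 1) s ans from
        by rw [maxCount_loop, if_pos hb]]
      rw [hb]
      simp only [Bool.not_true, Bool.false_eq_true, if_false]
      exact ih (i + 1) s ans (by push_cast at hk ⊢; omega)
    · rw [show maxCount_loop bans mx (fuel + 1) i s ans
          = if s + i ≤ mx then maxCount_loop bans mx fuel (i + 1) (s + i) (ans + 1) else ans from
        by rw [maxCount_loop, if_neg hb]]
      rw [Bool.not_eq_true] at hb
      rw [hb]
      simp only [Bool.not_false, if_true, scanA]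
      split_ifs with hle
      · exact ih (i + 1) _ _ (by push_cast at hk ⊢; omega)
      · rfl

-- the result of B's while-loop does not depend on the fuel, as long as there is enough
lemma scanB_fuel_irrel :
    ∀ (f1 f2 : Nat) (r i ans : Int), 1 ≤ i →
      (r - i + 1).toNat < f1 → (r - i + 1).toNat < f2 →
      maxCount_scanB f1 r i ans = maxCount_scanB f2 r i ans := by
  intro f1
  induction f1 with
  | zero => intro f2 r i ans _ h1 _; omega
  | succ g1 ih =>
    intro f2 r i ans hi h1 h2
    obtain ⟨g2, rfl⟩ : ∃ g2, f2 = g2 + 1 := ⟨f2 - 1, by omega⟩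
    rw [maxCount_scanB, maxCount_scanB]
    by_cases hc : 0 ≤ r - i
    · rw [if_pos hc, if_pos hc]
      exact ih g2 (r - i) (i + 1) (ans + 1) (by omega) (by omega) (by omega)
    · rw [if_neg hc, if_neg hc]

lemma Tsum_rec (lo hi : Int) : Tsum lo hi = lo + Tsum (lo + 1) hi := by
  unfold Tsum
  have k1 : (lo + hi) * (hi - lo + 1) = 2 * lo + (lo + 1 + hi) * (hi - (lo + 1) + 1) := by ring
  rw [k1, PySem.Int.floordiv_eq_ediv_of_pos (by norm_num),
      PySem.Int.floordiv_eq_ediv_of_pos (by norm_num)]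
  omega

lemma Tsum_nonneg (lo hi : Int) (h1 : 1 ≤ lo) (h2 : lo ≤ hi + 1) : 0 ≤ Tsum lo hi := by
  unfold Tsum
  rw [PySem.Int.floordiv_eq_ediv_of_pos (by norm_num)]
  have : 0 ≤ (lo + hi) * (hi - lo + 1) := mul_nonneg (by omega) (by omega)
  omega

lemma Tsum_self (lo : Int) : Tsum lo ((lo + 1) - 1) = lo := by
  unfold Tsum
  have hp : (lo + ((lo + 1) - 1)) * (((lo + 1) - 1) - lo + 1) = 2 * lo := by ring
  rw [hp, PySem.Int.floordiv_eq_ediv_of_pos (by norm_num)]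
  omega

-- a whole gap [lo, m) that fits is consumed completely, adding Tsum lo (m-1) and its length
lemma scan_gap_fit (mx : Int) :
    ∀ (k : Nat) (lo m s ans : Int) (rest : List Int), 1 ≤ lo → m = lo + k →
      s + Tsum lo (m - 1) ≤ mx →
      scanA mx (PySem.List.pyRange lo m 1 ++ rest) s ans
        = scanA mx rest (s + Tsum lo (m - 1)) (ans + k) := by
  intro k
  induction k with
  | zero =>
    intro lo m s ans rest h1 hm hfit
    have hm' : m = lo := by push_cast at hm; omega
    clear hm
    have hT : Tsum lo (m - 1) = 0 := by
      unfold Tsum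
      have hp : (lo + (m - 1)) * ((m - 1) - lo + 1) = 0 := by rw [hm']; ring
      rw [hp]
      decide
    rw [PySem.List.pyRange_one_eq_nil (by omega), hT]
    simp
  | succ k ih =>
    intro lo m s ans rest h1 hm hfit
    push_cast at hm
    have hrec : Tsum lo (m - 1) = lo + Tsum (lo + 1) (m - 1) := Tsum_rec lo (m - 1)
    have hTnn : 0 ≤ Tsum (lo + 1) (m - 1) := Tsum_nonneg _ _ (by omega) (by omega)
    have hfit2 : s + lo + Tsum (lo + 1) (m - 1) ≤ mx := by omega
    rw [PySem.List.pyRange_one_cons (by omega)]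
    simp only [List.cons_append, scanA]
    rw [if_pos (by omega)]
    rw [ih (lo + 1) m (s + lo) (ans + 1) rest (by omega) (by omega) hfit2]
    rw [hrec]
    congr 1 <;> push_cast <;> ring

-- a gap [lo, m) that does not fit: A's remaining scan is exactly B's inner while-loop
lemma scan_gap_nofit (mx : Int) :
    ∀ (k : Nat) (lo m s ans : Int) (rest : List Int), 1 ≤ lo → m = lo + k + 1 →
      mx < s + Tsum lo (m - 1) →
      scanA mx (PySem.List.pyRange lo m 1 ++ rest) s ans
        = maxCount_scanB ((mx - s - lo + 1).toNat + 1) (mx - s) lo ans := by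
  intro k
  induction k with
  | zero =>
    intro lo m s ans rest h1 hm hnf
    have hm' : m = lo + 1 := by push_cast at hm; omega
    subst hm'
    rw [Tsum_self lo] at hnf
    rw [PySem.List.pyRange_one_cons (by omega), PySem.List.pyRange_one_eq_nil (by omega)]
    simp only [List.nil_append, List.cons_append, scanA]
    rw [if_neg (by omega), maxCount_scanB, if_neg (by omega)]
  | succ k ih =>
    intro lo m s ans rest h1 hm hnf
    push_cast at hm
    have hrec : Tsum lo (m - 1) = lo + Tsum (lo + 1) (m - 1) := Tsum_rec lo (m - 1)
    rw [PySem.List.pyRange_one_cons (by omega)]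
    simp only [List.cons_append, scanA]
    have hnf2 : mx < s + lo + Tsum (lo + 1) (m - 1) := by omega
    by_cases hle : s + lo ≤ mx
    · rw [if_pos hle]
      rw [ih (lo + 1) m (s + lo) (ans + 1) rest (by omega) (by omega) hnf2]
      have hrhs : maxCount_scanB ((mx - s - lo + 1).toNat + 1) (mx - s) lo ans
          = maxCount_scanB ((mx - s - lo + 1).toNat) (mx - s - lo) (lo + 1) (ans + 1) := by
        rw [maxCount_scanB, if_pos (by omega)]
      rw [hrhs, show mx - (s + lo) = mx - s - lo from by ring]
      exact scanB_fuel_irrel _ _ _ _ _ (by omega) (by omega) (by omega)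
    · rw [if_neg hle, maxCount_scanB, if_neg (by omega)]

-- main invariant: B's gap walk equals A's scan of the filtered range
lemma gaps_eq_scan (mx n : Int) :
    ∀ (bs : List Int) (lo s ans : Int), 1 ≤ lo →
      bs.Pairwise (· < ·) → (∀ b ∈ bs, lo ≤ b ∧ b ≤ n) →
      scanA mx ((PySem.List.pyRange lo (n + 1) 1).filter (fun i => !(bs.contains i))) s ans
        = maxCount_gaps (bs ++ [n + 1]) (mx - s) ans lo := by
  intro bs
  induction bs with
  | nil =>
    intro lo s ans h1 _ _
    have hfilt : (PySem.List.pyRange lo (n + 1) 1).filter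
        (fun i => !(([] : List Int).contains i)) = PySem.List.pyRange lo (n + 1) 1 := by
      simp
    rw [hfilt]
    simp only [List.nil_append, maxCount_gaps]
    by_cases hlon : lo ≤ n + 1 - 1
    · rw [if_pos hlon]
      by_cases hfit : PySem.Int.floordiv ((lo + (n + 1 - 1)) * ((n + 1 - 1) - lo + 1)) 2 ≤ mx - s
      · rw [if_pos hfit]
        have hT : Tsum lo (n + 1 - 1)
            = PySem.Int.floordiv ((lo + (n + 1 - 1)) * ((n + 1 - 1) - lo + 1)) 2 := rfl
        have hstep := scan_gap_fit mx (n + 1 - lo).toNat lo (n + 1) s ans []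
          h1 (by omega) (by rw [hT]; omega)
        rw [List.append_nil] at hstep
        rw [hstep]
        simp only [scanA]
        omega
      · rw [if_neg hfit]
        have hT : Tsum lo (n + 1 - 1)
            = PySem.Int.floordiv ((lo + (n + 1 - 1)) * ((n + 1 - 1) - lo + 1)) 2 := rfl
        have hstep := scan_gap_nofit mx (n - lo).toNat lo (n + 1) s ans []
          h1 (by omega) (by rw [hT]; omega)
        rw [List.append_nil] at hstep
        exact hstep
    · rw [if_neg hlon]
      rw [PySem.List.pyRange_one_eq_nil (by omega)]
      simp only [scanA]
  | cons b rest' ih =>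
    intro lo s ans h1 hpw hmem
    have hb := hmem b (by simp)
    have hrest : ∀ x ∈ rest', b < x := fun x hx => (List.pairwise_cons.mp hpw).1 x hx
    -- split the range 1..n at b and b+1
    rw [PySem.List.pyRange_one_append lo b (n + 1) (by omega) (by omega),
        PySem.List.pyRange_one_append b (b + 1) (n + 1) (by omega) (by omega),
        PySem.List.pyRange_one_cons (show b < b + 1 by omega),
        PySem.List.pyRange_one_eq_nil (show b + 1 ≤ b + 1 by omega)]
    simp only [List.filter_append, List.filter_cons, List.filter_nil]
    have hfilt1 : (PySem.List.pyRange lo b 1).filter (fun i => !((b :: rest').contains i))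
        = PySem.List.pyRange lo b 1 := by
      apply List.filter_eq_self.mpr
      intro x hx
      have hx' := PySem.List.mem_pyRange_one.mp hx
      have hnot : x ∉ b :: rest' := by
        intro hmem'
        rcases List.mem_cons.mp hmem' with rfl | h'
        · omega
        · have := hrest x h'; omega
      simp [hnot]
    have hcond : (!((b :: rest').contains b)) = false := by simp
    have hfilt2 : (PySem.List.pyRange (b + 1) (n + 1) 1).filter
          (fun i => !((b :: rest').contains i))
        = (PySem.List.pyRange (b + 1) (n + 1) 1).filter (fun i => !(rest'.contains i)) := by
      apply List.filter_congr
      intro x hx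
      have hx' := PySem.List.mem_pyRange_one.mp hx
      have hne : (x == b) = false := by
        simp only [beq_eq_false_iff_ne]
        omega
      rw [List.contains_cons, hne, Bool.false_or]
    rw [hfilt1, hcond, hfilt2]
    simp only [Bool.false_eq_true, if_false, List.nil_append]
    simp only [List.cons_append, maxCount_gaps]
    have hIH : ∀ s' ans', scanA mx ((PySem.List.pyRange (b + 1) (n + 1) 1).filter
          (fun i => !(rest'.contains i))) s' ans'
        = maxCount_gaps (rest' ++ [n + 1]) (mx - s') ans' (b + 1) := by
      intro s' ans'
      exact ih (b + 1) s' ans' (by omega) (List.pairwise_cons.mp hpw).2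
        (fun x hx => ⟨by have := hrest x hx; omega, (hmem x (by simp [hx])).2⟩)
    by_cases hgap : lo ≤ b - 1
    · rw [if_pos hgap]
      have hT : Tsum lo (b - 1)
          = PySem.Int.floordiv ((lo + (b - 1)) * ((b - 1) - lo + 1)) 2 := rfl
      by_cases hfit : PySem.Int.floordiv ((lo + (b - 1)) * ((b - 1) - lo + 1)) 2 ≤ mx - s
      · rw [if_pos hfit]
        rw [scan_gap_fit mx (b - lo).toNat lo b s ans _ h1 (by omega) (by rw [hT]; omega)]
        rw [hT, hIH]
        have harg1 : mx - (s + PySem.Int.floordiv ((lo + (b - 1)) * ((b - 1) - lo + 1)) 2)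
            = mx - s - PySem.Int.floordiv ((lo + (b - 1)) * ((b - 1) - lo + 1)) 2 := by ring
        have harg2 : ans + (((b - lo).toNat : Nat) : Int) = ans + ((b - 1) - lo + 1) := by omega
        rw [harg1, harg2]
      · rw [if_neg hfit]
        exact scan_gap_nofit mx (b - 1 - lo).toNat lo b s ans _ h1 (by omega) (by rw [hT]; omega)
    · rw [if_neg hgap]
      rw [PySem.List.pyRange_one_eq_nil (by omega)]
      simp only [List.nil_append]
      exact hIH s ans

-- ===== VERDICT (by name: the statement is the Claim_ definition above) =====
theorem maxCount_spec : Claim_equal_maxCount := by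
  intro banned n maxSum _
  unfold Spec_maxCount maxCount maxCount_alt
  set bs := PySem.List.sorted
    (PySem.Set.ofList (banned.filter (fun b => decide (1 ≤ b ∧ b ≤ n)))) (fun x => x) false with hbs
  have hmembs : ∀ x : Int, x ∈ bs ↔ (x ∈ banned ∧ 1 ≤ x ∧ x ≤ n) := by
    intro x
    rw [hbs, PySem.List.mem_sorted, PySem.Set.mem_ofList, List.mem_filter]
    simp
  rw [maxCount_loop_eq_scanA (PySem.Set.ofList banned) n maxSum n.toNat 1 0 0 (by omega)]
  have hfc : (PySem.List.pyRange 1 (n + 1) 1).filter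
        (fun i => !(PySem.Set.contains (PySem.Set.ofList banned) i))
      = (PySem.List.pyRange 1 (n + 1) 1).filter (fun i => !(bs.contains i)) := by
    apply List.filter_congr
    intro x hx
    have hx' := PySem.List.mem_pyRange_one.mp hx
    have hiff : x ∈ banned ↔ x ∈ bs := by
      rw [hmembs]
      exact ⟨fun h => ⟨h, by omega, by omega⟩, fun h => h.1⟩
    simp [PySem.Set.contains, PySem.Set.mem_ofList, hiff]
  rw [hfc]
  rw [gaps_eq_scan maxSum n bs 1 0 0 (by omega)
    (PySem.List.sorted_ofList_pairwise_lt _)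
    (fun b hb => by have := (hmembs b).mp hb; exact ⟨by omega, this.2.2⟩)]
  congr 1
  omega
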